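-- pv_equiv track=rewrite | github.com/suarezmanuel/the-site | sat/dpll.py | pure_literal_assign
-- ===== SOURCE A (Python) =====
-- def eval_clause(clause, assignment):
--     any_undef = False
--     for lit in clause:
--         v = abs(lit)
--         sign = lit > 0
--         if v in assignment:
--             if assignment[v] == sign:
--                 return True
--         else:
--             any_undef = True
--     return None if any_undef else False
--
-- def pure_literal_assign(cnf, assignment):
--     counts = {}
--     for clause in cnf:
--         if eval_clause(clause, assignment):
--             continue
--         for lit in clause:
--             v = abs(lit)
--             if v in assignment:
--                 continue
--             counts.setdefault(v, 0)
--             counts[v] |= (1 if lit > 0 else 2)  # bitmask: 1=positive,2=negative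
--     for v, mask in counts.items():
--         if mask == 1:
--             assignment[v] = True
--         elif mask == 2:
--             assignment[v] = False
--     return assignment
-- ===== SOURCE B (Python) =====
-- def pure_literal_assign(cnf, assignment):
--     # Staged: flatten the unassigned literals of unsatisfied clauses into one
--     # list, then classify each distinct variable by rescanning that list.
--     lits = [lit
--             for clause in cnf
--             if not any(assignment.get(abs(l)) == (l > 0) for l in clause)
--             for lit in clause if abs(lit) not in assignment]
--     for v in dict.fromkeys(map(abs, lits)):
--         signs = [l > 0 for l in lits if abs(l) == v]
--         if all(signs):
--             assignment[v] = True
--         elif not any(signs):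
--             assignment[v] = False
--     return assignment
-- ===== Notes on version B (the rewrite author's own statement) =====
-- stated objective: alternative
-- what changed: Replaces A's single-pass per-variable bitmask dict (setdefault + |= then a mask-classification loop) by a staged pipeline: flatten all unassigned literals of unsatisfied clauses into one list, dedup the variables (dict.fromkeys), and classify each variable by rescanning that flat list with all()/any() over its occurrence signs.
import Mathlib
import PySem

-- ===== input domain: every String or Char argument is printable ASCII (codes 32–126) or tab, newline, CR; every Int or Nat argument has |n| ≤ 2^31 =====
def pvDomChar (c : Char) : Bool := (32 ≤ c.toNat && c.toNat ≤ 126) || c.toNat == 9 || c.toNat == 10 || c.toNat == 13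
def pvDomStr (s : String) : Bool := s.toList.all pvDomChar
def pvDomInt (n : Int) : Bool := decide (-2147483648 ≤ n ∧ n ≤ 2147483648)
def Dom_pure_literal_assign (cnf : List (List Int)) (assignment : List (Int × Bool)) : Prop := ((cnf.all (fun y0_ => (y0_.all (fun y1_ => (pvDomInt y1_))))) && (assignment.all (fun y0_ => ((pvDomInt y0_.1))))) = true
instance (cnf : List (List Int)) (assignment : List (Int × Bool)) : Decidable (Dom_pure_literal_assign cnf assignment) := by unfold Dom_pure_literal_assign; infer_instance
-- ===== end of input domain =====

-- B replaces A's one-pass per-variable bitmask dict by a staged pipeline: flatten the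
-- unassigned literals of unsatisfied clauses, dedup the variables, and classify each by
-- rescanning the flat list (objective: alternative). Python A mutates `assignment` in
-- place (B performs the same mutation); the equivalence proved is about the return value.

-- ===== PORT A =====
-- helper eval_clause (returns True / False / None, modelled as some true / some false / none)
def pvEvalClause (asg : PySem.Dict Int Bool) : List Int → Bool → Option Bool
  | [], anyUndef => if anyUndef then none else some false
  | lit :: rest, anyUndef =>
    match asg.get? (abs lit) with
    | some b => if b == decide (lit > 0) then some true else pvEvalClause asg rest anyUndef
    | none => pvEvalClause asg rest true

def pure_literal_assign (cnf : List (List Int)) (assignment : List (Int × Bool)) : List (Int × Bool) :=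
  let asg : PySem.Dict Int Bool := PySem.Dict.mk assignment
  let counts : PySem.Dict Int Int := cnf.foldl (fun counts clause =>
    if pvEvalClause asg clause false == some true then counts
    else clause.foldl (fun counts lit =>
      let v := abs lit
      if asg.contains v then counts
      else
        let counts := counts.setdefault v 0
        counts.insert v (PySem.Int.bor (counts.getD v 0) (if lit > 0 then 1 else 2))) counts)
    PySem.Dict.empty
  (counts.items.foldl (fun (a : PySem.Dict Int Bool) vm =>
    if vm.2 == 1 then a.insert vm.1 true
    else if vm.2 == 2 then a.insert vm.1 false else a) asg).items

-- ===== PORT B =====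
-- the inlined any(assignment.get(abs(l)) == (l > 0) for l in clause)
def pvSatClause (asg : PySem.Dict Int Bool) (clause : List Int) : Bool :=
  clause.any (fun l => asg.get? (abs l) == some (decide (l > 0)))

def pure_literal_assign_alt (cnf : List (List Int)) (assignment : List (Int × Bool)) : List (Int × Bool) :=
  let asg : PySem.Dict Int Bool := PySem.Dict.mk assignment
  -- the flattening comprehension
  let lits : List Int :=
    (cnf.filter (fun clause => !(pvSatClause asg clause))).flatMap
      (fun clause => clause.filter (fun l => !(asg.contains (abs l))))
  -- dict.fromkeys(map(abs, lits)) iterated, with the per-variable rescans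
  ((PySem.List.dedup (lits.map (fun l => abs l))).foldl (fun (a : PySem.Dict Int Bool) v =>
      let signs := (lits.filter (fun l => abs l == v)).map (fun l => decide (l > 0))
      if signs.all id then a.insert v true
      else if !(signs.any id) then a.insert v false
      else a) asg).items

-- ===== PRECONDITION & SPEC =====
def Spec_pure_literal_assign (cnf : List (List Int)) (assignment : List (Int × Bool)) (out : List (Int × Bool)) : Prop := out = pure_literal_assign_alt cnf assignment
instance (cnf : List (List Int)) (assignment : List (Int × Bool)) (out : List (Int × Bool)) : Decidable (Spec_pure_literal_assign cnf assignment out) := by unfold Spec_pure_literal_assign; infer_instance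

-- ===== CLAIM (what is proved, stated in full; the proofs are below) =====
def Claim_equal_pure_literal_assign : Prop := ∀ (cnf : List (List Int)) (assignment : List (Int × Bool)), Dom_pure_literal_assign cnf assignment → Spec_pure_literal_assign cnf assignment (pure_literal_assign cnf assignment)

-- ===== LEMMAS AND PROOFS =====

-- the mask A's dict stores for a variable, read off the flat literal list
def pvMaskOf (lits : List Int) (v : Int) : Int :=
  (if lits.any (fun l => abs l == v && decide (l > 0)) then 1 else 0) +
  (if lits.any (fun l => abs l == v && !decide (l > 0)) then 2 else 0)

-- invariant tying A's counts dict to the flat literal list accumulated so far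
def pvInv (d : PySem.Dict Int Int) (lits : List Int) : Prop :=
  d.keys = PySem.List.dedup (lits.map (fun l => abs l)) ∧
  ∀ v, d.getD v 0 = pvMaskOf lits v

theorem pvEval_eq_sat (asg : PySem.Dict Int Bool) (clause : List Int) (u : Bool) :
    (pvEvalClause asg clause u == some true) = pvSatClause asg clause := by
  induction clause generalizing u with
  | nil => cases u <;> simp [pvEvalClause, pvSatClause]
  | cons l rest ih =>
    have hsat : pvSatClause asg (l :: rest) = ((asg.get? (abs l) == some (decide (l > 0))) || pvSatClause asg rest) := rfl
    rw [hsat]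
    cases h : asg.get? (abs l) with
    | none =>
      have he : pvEvalClause asg (l :: rest) u = pvEvalClause asg rest true := by
        simp [pvEvalClause, h]
      rw [he, ih true]; simp
    | some b =>
      by_cases hb : b = decide (l > 0)
      · have he : pvEvalClause asg (l :: rest) u = some true := by
          simp [pvEvalClause, h, hb]
        rw [he]; simp [hb]
      · have he : pvEvalClause asg (l :: rest) u = pvEvalClause asg rest u := by
          simp [pvEvalClause, h, hb]
        rw [he, ih u]; simp [hb]

theorem pvMaskOf_append (lits : List Int) (l v : Int) :
    pvMaskOf (lits ++ [l]) v =
      if abs l == v then PySem.Int.bor (pvMaskOf lits v) (if l > 0 then 1 else 2)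
      else pvMaskOf lits v := by
  by_cases hv : abs l = v
  · simp only [pvMaskOf, List.any_append, List.any_cons, List.any_nil, hv, if_pos (beq_self_eq_true v)]
    by_cases h1 : lits.any (fun x => abs x == v && decide (x > 0)) <;>
      by_cases h2 : lits.any (fun x => abs x == v && !decide (x > 0)) <;>
      by_cases hl : l > 0 <;>
      simp [h1, h2, hl] <;> decide
  · have hvb : (abs l == v) = false := by simp [hv]
    simp [pvMaskOf, List.any_append, hvb]

theorem pvInv_empty : pvInv PySem.Dict.empty [] := by
  refine ⟨rfl, fun v => ?_⟩
  simp [PySem.Dict.getD_empty, pvMaskOf]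

theorem pvInv_step (asg : PySem.Dict Int Bool) (lit : Int)
    (d : PySem.Dict Int Int) (lits : List Int)
    (hc : asg.contains (abs lit) = false)
    (h : pvInv d lits) :
    pvInv
      ((d.setdefault (abs lit) 0).insert (abs lit)
        (PySem.Int.bor ((d.setdefault (abs lit) 0).getD (abs lit) 0) (if lit > 0 then 1 else 2)))
      (lits ++ [lit]) := by
  obtain ⟨h1, h2⟩ := h
  have hdedup : PySem.List.dedup ((lits ++ [lit]).map (fun l => abs l))
      = PySem.Set.add (PySem.List.dedup (lits.map (fun l => abs l))) (abs lit) := by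
    simp only [List.map_append, List.map_cons, List.map_nil, PySem.List.dedup_eq_ofList]
    exact PySem.Set.ofList_append_singleton _ _
  by_cases hd : d.contains (abs lit) = true
  · rw [PySem.Dict.setdefault_of_contains d _ hd]
    have hmem : abs lit ∈ d.keys := (PySem.Dict.contains_iff_mem_keys d _).mp hd
    constructor
    · rw [PySem.Dict.keys_insert_of_contains d _ hd, hdedup, h1,
        PySem.Set.add_of_mem (h1 ▸ hmem)]
    · intro v
      by_cases hv : v = abs lit
      · subst hv
        rw [PySem.Dict.getD_insert_self, h2, pvMaskOf_append]
        simp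
      · rw [PySem.Dict.getD_insert_of_ne _ _ _ hv, h2, pvMaskOf_append]
        have hne : (abs lit == v) = false := by
          rw [beq_eq_false_iff_ne]; exact fun h => hv h.symm
        simp [hne]
  · have hd' : d.contains (abs lit) = false := by simpa using hd
    have hnmem : abs lit ∉ d.keys := fun h =>
      absurd ((PySem.Dict.contains_iff_mem_keys d _).mpr h) (by simp [hd'])
    rw [PySem.Dict.setdefault_of_not_contains d _ hd', PySem.Dict.insert_insert_self]
    constructor
    · rw [PySem.Dict.keys_insert_of_not_contains d _ hd', hdedup, h1,
        PySem.Set.add_of_not_mem (h1 ▸ hnmem)]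
    · intro v
      by_cases hv : v = abs lit
      · subst hv
        rw [PySem.Dict.getD_insert_self, PySem.Dict.getD_insert_self, pvMaskOf_append]
        have hmask : pvMaskOf lits (abs lit) = 0 := by
          have hno : ∀ l ∈ lits, (abs l == abs lit) = false := by
            intro l hl
            by_contra hcb
            have : abs l = abs lit := by
              have := eq_of_beq (Bool.of_not_eq_false hcb)
              exact this
            exact (h1 ▸ hnmem) (by
              rw [PySem.List.dedup_eq_ofList, PySem.Set.mem_ofList]
              exact this ▸ List.mem_map_of_mem hl)
          simp only [pvMaskOf]
          rw [List.any_eq_false.mpr (fun l hl => by simp [hno l hl]),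
            List.any_eq_false.mpr (fun l hl => by simp [hno l hl])]
          simp
        simp [hmask]
      · rw [PySem.Dict.getD_insert_of_ne _ _ _ hv, h2, pvMaskOf_append]
        have hne : (abs lit == v) = false := by
          rw [beq_eq_false_iff_ne]; exact fun h => hv h.symm
        simp [hne]

theorem pvInv_clause (asg : PySem.Dict Int Bool) (clause : List Int)
    (d : PySem.Dict Int Int) (lits : List Int) (h : pvInv d lits) :
    pvInv
      (clause.foldl (fun counts lit =>
        let v := abs lit
        if asg.contains v then counts
        else
          let counts := counts.setdefault v 0
          counts.insert v (PySem.Int.bor (counts.getD v 0) (if lit > 0 then 1 else 2))) d)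
      (lits ++ clause.filter (fun l => !(asg.contains (abs l)))) := by
  induction clause generalizing d lits with
  | nil => simpa using h
  | cons lit rest ih =>
    simp only [List.foldl_cons, List.filter_cons]
    by_cases hc : asg.contains (abs lit) = true
    · simp only [hc, if_pos, Bool.not_true]
      simpa using ih d lits h
    · have hc' : asg.contains (abs lit) = false := by simpa using hc
      simp only [hc', Bool.not_false, if_neg (by simp [hc'] : ¬ (asg.contains (abs lit) = true))]
      have := ih _ _ (pvInv_step asg lit d lits hc' h)
      simpa [List.append_assoc] using this

theorem pvInv_cnf (asg : PySem.Dict Int Bool) (cnf : List (List Int))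
    (d : PySem.Dict Int Int) (lits : List Int) (h : pvInv d lits) :
    pvInv
      (cnf.foldl (fun counts clause =>
        if pvEvalClause asg clause false == some true then counts
        else clause.foldl (fun counts lit =>
          let v := abs lit
          if asg.contains v then counts
          else
            let counts := counts.setdefault v 0
            counts.insert v (PySem.Int.bor (counts.getD v 0) (if lit > 0 then 1 else 2))) counts) d)
      (lits ++ (cnf.filter (fun clause => !(pvSatClause asg clause))).flatMap
        (fun clause => clause.filter (fun l => !(asg.contains (abs l))))) := by
  induction cnf generalizing d lits with
  | nil => simpa using h
  | cons clause rest ih =>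
    rw [List.foldl_cons, pvEval_eq_sat asg clause false, List.filter_cons]
    by_cases hg : pvSatClause asg clause = true
    · simp only [hg, if_pos, Bool.not_true]
      simpa using ih d lits h
    · have hg' : pvSatClause asg clause = false := by simpa using hg
      simp only [hg', Bool.not_false, if_neg (by simp [hg'] : ¬ (pvSatClause asg clause = true))]
      have := ih _ _ (pvInv_clause asg clause d lits h)
      simpa [List.flatMap_cons, List.append_assoc] using this

-- the two occurrence-sign tests of B, re-expressed through pvMaskOf's bits
theorem pvSigns_all (lits : List Int) (v : Int) :
    ((lits.filter (fun l => abs l == v)).map (fun l => decide (l > 0))).all id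
      = !(lits.any (fun l => abs l == v && !decide (l > 0))) := by
  induction lits with
  | nil => rfl
  | cons l rest ih =>
    by_cases hv : (abs l == v) = true <;> by_cases hs : l > 0 <;>
      simp [List.filter_cons, List.any_cons, hv, hs, ih]

theorem pvSigns_any (lits : List Int) (v : Int) :
    ((lits.filter (fun l => abs l == v)).map (fun l => decide (l > 0))).any id
      = lits.any (fun l => abs l == v && decide (l > 0)) := by
  induction lits with
  | nil => rfl
  | cons l rest ih =>
    by_cases hv : (abs l == v) = true <;> by_cases hs : l > 0 <;>
      simp [List.filter_cons, List.any_cons, hv, hs, ih]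

theorem pvFinal (asg : PySem.Dict Int Bool) (d : PySem.Dict Int Int)
    (lits : List Int) (h : pvInv d lits) :
    d.items.foldl (fun (a : PySem.Dict Int Bool) vm =>
      if vm.2 == 1 then a.insert vm.1 true
      else if vm.2 == 2 then a.insert vm.1 false else a) asg
    = (PySem.List.dedup (lits.map (fun l => abs l))).foldl (fun (a : PySem.Dict Int Bool) v =>
        let signs := (lits.filter (fun l => abs l == v)).map (fun l => decide (l > 0))
        if signs.all id then a.insert v true
        else if !(signs.any id) then a.insert v false
        else a) asg := by
  obtain ⟨h1, h2⟩ := h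
  have hnd : d.keys.Nodup := by
    rw [h1, PySem.List.dedup_eq_ofList]; exact PySem.Set.nodup_ofList _
  rw [PySem.Dict.items_eq_map_keys d hnd 0, h1, List.foldl_map]
  apply PySem.List.foldl_congr_mem
  intro a v hv
  have hocc : lits.any (fun l => abs l == v) = true := by
    rw [PySem.List.dedup_eq_ofList, PySem.Set.mem_ofList, List.mem_map] at hv
    obtain ⟨l, hl, hlv⟩ := hv
    exact List.any_eq_true.mpr ⟨l, hl, by simp [hlv]⟩
  have hbits : lits.any (fun l => abs l == v && decide (l > 0)) = true ∨
      lits.any (fun l => abs l == v && !decide (l > 0)) = true := by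
    obtain ⟨l, hl, hlv⟩ := List.any_eq_true.mp hocc
    by_cases hs : l > 0
    · exact Or.inl (List.any_eq_true.mpr ⟨l, hl, by simp [hlv, hs]⟩)
    · exact Or.inr (List.any_eq_true.mpr ⟨l, hl, by simp [hlv, hs]⟩)
  simp only [h2 v, pvMaskOf, pvSigns_all, pvSigns_any]
  by_cases hp : lits.any (fun l => abs l == v && decide (l > 0)) = true <;>
    by_cases hn : lits.any (fun l => abs l == v && !decide (l > 0)) = true
  · simp [hp, hn]
  · simp [hp, hn]
  · simp [hp, hn]
  · rcases hbits with h | h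
    · exact absurd h hp
    · exact absurd h hn

-- ===== VERDICT (by name: the statement is the Claim_ definition above) =====
theorem pure_literal_assign_spec : Claim_equal_pure_literal_assign := by
  intro cnf assignment _
  unfold Spec_pure_literal_assign pure_literal_assign pure_literal_assign_alt
  exact congrArg PySem.Dict.items
    (pvFinal (PySem.Dict.mk assignment) _ _
      (by simpa using pvInv_cnf (PySem.Dict.mk assignment) cnf PySem.Dict.empty [] pvInv_empty))
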